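-- pv_equiv track=rewrite | github.com/3LENDERMAN/Python_projects | 05/maps.py | kernel
-- ===== SOURCE A (Python) =====
-- def kernel(f: dict[int, int]) -> set[tuple[int, int]]:
--     value_groups: dict[int, list[int]] = {}
--     for key, val in f.items():
--         if val not in value_groups:
--             value_groups[val] = []
--         value_groups[val].append(key)
--
--     # Create set of tuples based on groups
--     result: set[tuple[int, int]] = set()
--     for group in value_groups.values():
--         # For each group create tuples
--         for i in range(len(group)):
--             for j in range(i, len(group)):
--                 result.add((group[i], group[j]))  # add (x, y)
--                 result.add((group[j], group[i]))  # add (y, x) for symmetry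
--     return result
-- ===== SOURCE B (Python) =====
-- def kernel(f: dict[int, int]) -> set[tuple[int, int]]:
--     out: list[tuple[int, int]] = []
--     seen: list[int] = []
--     for x, v in f.items():
--         if v in seen:
--             continue
--         seen.append(v)
--         grp = [k for k, w in f.items() if w == v]
--         while grp:
--             y, grp = grp[0], grp[1:]
--             out.append((y, y))
--             for z in grp:
--                 out.append((y, z))
--                 out.append((z, y))
--     return set(out)
-- ===== Notes on version B (the rewrite author's own statement) =====
-- stated objective: alternative
-- what changed: B drops A's value->keys grouping dict and its set-dedup double-index loops: for each first-seen value it rescans the items to collect that value's group and emits the group's pairs directly into a plain list (head/rest sweep, no duplicate adds), turning it into a set once at the end.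
import Mathlib
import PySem

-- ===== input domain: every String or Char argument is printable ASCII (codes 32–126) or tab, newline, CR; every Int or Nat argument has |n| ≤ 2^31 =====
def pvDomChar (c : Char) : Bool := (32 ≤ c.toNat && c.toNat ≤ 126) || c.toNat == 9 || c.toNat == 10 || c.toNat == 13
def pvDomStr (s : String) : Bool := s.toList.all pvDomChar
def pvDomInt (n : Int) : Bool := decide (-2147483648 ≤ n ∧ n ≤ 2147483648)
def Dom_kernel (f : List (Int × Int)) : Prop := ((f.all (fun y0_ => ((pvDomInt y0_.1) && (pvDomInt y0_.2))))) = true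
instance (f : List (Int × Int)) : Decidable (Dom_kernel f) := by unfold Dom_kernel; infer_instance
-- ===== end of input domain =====

-- B drops A's value→keys grouping dict and its set-dedup inner loops: it rescans the items for each
-- first-seen value and emits each group's pairs directly into a plain list; objective: alternative structure, same cost.

-- ===== PORT A =====
def kernel (f : List (Int × Int)) : List (Int × Int) :=
  let vg : PySem.Dict Int (List Int) := f.foldl (fun d kv =>
    let d1 := if d.contains kv.2 then d else d.insert kv.2 ([] : List Int)
    d1.insert kv.2 (d1.getD kv.2 [] ++ [kv.1])) PySem.Dict.empty
  vg.values.foldl (fun res g =>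
    (PySem.List.pyRange 0 (PySem.List.len g)).foldl (fun res i =>
      (PySem.List.pyRange i (PySem.List.len g)).foldl (fun res j =>
        PySem.Set.add (PySem.Set.add res (PySem.List.pyGetD g i 0, PySem.List.pyGetD g j 0))
          (PySem.List.pyGetD g j 0, PySem.List.pyGetD g i 0)) res) res) PySem.Set.empty

-- ===== PORT B =====
-- the 'while grp: y, grp = grp[0], grp[1:] …' loop of Source B, as structural recursion on the group
def emitGroup : List Int → List (Int × Int)
  | [] => []
  | y :: grp => ((y, y) :: grp.flatMap (fun z => [(y, z), (z, y)])) ++ emitGroup grp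

def kernel_alt (f : List (Int × Int)) : List (Int × Int) :=
  PySem.Set.ofList (f.foldl (fun acc kv =>
    if kv.2 ∈ acc.1 then acc
    else (acc.1 ++ [kv.2], acc.2 ++ emitGroup ((f.filter (fun p => p.2 == kv.2)).map Prod.fst)))
    (([] : List Int), ([] : List (Int × Int)))).2

-- ===== PRECONDITION & SPEC =====
-- Pre_ excludes association lists with duplicate keys: they do not represent a value of the
-- parameter's type dict[int, int] (dict construction collapses duplicates before either function runs).
def Pre_kernel (f : List (Int × Int)) : Prop := (f.map Prod.fst).Nodup
instance (f : List (Int × Int)) : Decidable (Pre_kernel f) := by unfold Pre_kernel; infer_instance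
def pvWitness_kernel : (List (Int × Int)) := [(1, 7), (2, 7), (3, 5)]

def Spec_kernel (f : List (Int × Int)) (out : List (Int × Int)) : Prop := out = kernel_alt f
instance (f : List (Int × Int)) (out : List (Int × Int)) : Decidable (Spec_kernel f out) := by unfold Spec_kernel; infer_instance

-- ===== CLAIM (what is proved, stated in full; the proofs are below) =====
def Claim_equal_kernel : Prop := ∀ (f : List (Int × Int)), Dom_kernel f → Pre_kernel f → Spec_kernel f (kernel f)

-- ===== LEMMAS AND PROOFS =====

-- the group of keys mapped to value v, scanned from f (B's comprehension)
def grpOf (f : List (Int × Int)) (v : Int) : List Int :=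
  (f.filter (fun p => p.2 == v)).map Prod.fst

-- A's grouping-loop body ('if val not in …: … = []' then append) is Dict.modify
lemma stepA_eq_modify (d : PySem.Dict Int (List Int)) (kv : Int × Int) :
    (let d1 := if d.contains kv.2 then d else d.insert kv.2 ([] : List Int)
     d1.insert kv.2 (d1.getD kv.2 [] ++ [kv.1]))
    = d.modify kv.2 [] (fun g => g ++ [kv.1]) := by
  by_cases h : d.contains kv.2
  · simp [h, PySem.Dict.modify]
  · have hg : d.getD kv.2 ([] : List Int) = [] :=
      PySem.Dict.getD_of_not_contains d [] (by simp [h])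
    simp [h, PySem.Dict.modify, PySem.Dict.getD_insert_self,
      PySem.Dict.insert_insert_self, hg]

lemma getD_dictA (f : List (Int × Int)) (v : Int) :
    (f.foldl (fun d kv => d.modify kv.2 [] (fun g => g ++ [kv.1]))
      (PySem.Dict.empty : PySem.Dict Int (List Int))).getD v []
    = grpOf f v := by
  have h : f.foldl (fun d kv => d.modify kv.2 [] (fun g => g ++ [kv.1]))
      (PySem.Dict.empty : PySem.Dict Int (List Int))
      = (f.map Prod.swap).foldl (fun d p => d.modify p.1 [] (fun g => g ++ [p.2]))
        PySem.Dict.empty := by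
    rw [List.foldl_map]; rfl
  rw [h, PySem.Dict.getD_foldl_modify_append, PySem.Dict.getD_empty,
    List.filter_map, List.map_map]
  simp [grpOf, Function.comp_def]

-- A's grouping dict holds, in first-occurrence order of the values, exactly B's rescanned groups
lemma values_dictA (f : List (Int × Int)) :
    (f.foldl (fun d kv => d.modify kv.2 [] (fun g => g ++ [kv.1]))
      (PySem.Dict.empty : PySem.Dict Int (List Int))).values
    = (PySem.Set.ofList (f.map Prod.snd)).map (grpOf f) := by
  have hnd := PySem.Dict.nodup_keys_foldl_modify_key f (Prod.snd) ([] : List Int)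
    (fun _ x => fun g => g ++ [x.1]) PySem.Dict.empty PySem.Dict.nodup_keys_empty
  rw [PySem.Dict.values_eq_map_keys _ hnd ([] : List Int)]
  rw [PySem.Dict.keys_foldl_modify_key f (Prod.snd) ([] : List Int)
    (fun _ x => fun g => g ++ [x.1]) PySem.Dict.empty]
  rw [PySem.Dict.keys_empty, PySem.Set.update_nil_left]
  apply List.map_congr_left
  intro k _
  exact getD_dictA f k

lemma foldl_add_pairs (x : Int) (l : List Int) (s : PySem.Set (Int × Int)) :
    l.foldl (fun s y => PySem.Set.add (PySem.Set.add s (x, y)) (y, x)) s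
    = PySem.Set.update s (l.flatMap (fun y => [(x, y), (y, x)])) := by
  induction l generalizing s with
  | nil => simp [PySem.Set.update]
  | cons y t ih => simp [List.flatMap_cons, PySem.Set.update_cons, ih]

lemma pyRange_shift (a b : Int) :
    PySem.List.pyRange (a + 1) (b + 1) = (PySem.List.pyRange a b).map (· + 1) := by
  have h : (b + 1) - (a + 1) = b - a := by ring
  rw [PySem.List.pyRange_one, PySem.List.pyRange_one, h, List.map_map]
  apply List.map_congr_left
  intro k _
  simp
  ring

lemma pyGetD_cons_succ' (x : Int) (r : List Int) (i : Int) (h0 : 0 ≤ i) (h1 : i < (r.length : Int)) :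
    PySem.List.pyGetD (x :: r) (i + 1) 0 = PySem.List.pyGetD r i 0 := by
  rw [PySem.List.pyGetD_eq_getElem _ _ (by omega) (by simp; omega),
      PySem.List.pyGetD_eq_getElem _ _ h0 h1]
  have ht : (i + 1).toNat = i.toNat + 1 := by omega
  simp [ht]

lemma add_add_self (s : PySem.Set (Int × Int)) (p : Int × Int) :
    PySem.Set.add (PySem.Set.add s p) p = PySem.Set.add s p :=
  PySem.Set.add_of_mem (by simp [PySem.Set.mem_add])

-- A's per-group double index loop over a set is exactly an update with B's emitted pair list
lemma innerA_eq (g : List Int) (s : PySem.Set (Int × Int)) :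
    (PySem.List.pyRange 0 (PySem.List.len g)).foldl (fun res i =>
      (PySem.List.pyRange i (PySem.List.len g)).foldl (fun res j =>
        PySem.Set.add (PySem.Set.add res (PySem.List.pyGetD g i 0, PySem.List.pyGetD g j 0))
          (PySem.List.pyGetD g j 0, PySem.List.pyGetD g i 0)) res) s
    = PySem.Set.update s (emitGroup g) := by
  induction g generalizing s with
  | nil =>
    simp [PySem.List.len_eq, PySem.List.pyRange_one_eq_nil, emitGroup, PySem.Set.update]
  | cons x r ih =>
    simp only [PySem.List.len_eq] at ih ⊢
    have hcast : ((x :: r).length : Int) = (r.length : Int) + 1 := by push_cast [List.length_cons]; ring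
    rw [hcast]
    -- peel i = 0
    rw [PySem.List.pyRange_one_cons (by positivity), List.foldl_cons]
    -- the i = 0 inner loop: a fold over the whole list x :: r
    have h0 : (PySem.List.pyRange 0 ((r.length : Int) + 1)).foldl (fun res j =>
          PySem.Set.add (PySem.Set.add res (PySem.List.pyGetD (x :: r) 0 0, PySem.List.pyGetD (x :: r) j 0))
            (PySem.List.pyGetD (x :: r) j 0, PySem.List.pyGetD (x :: r) 0 0)) s
        = PySem.Set.update s ((x, x) :: r.flatMap (fun z => [(x, z), (z, x)])) := by
      rw [← hcast]
      have := PySem.List.foldl_pyRange_zero_pyGetD' (x :: r) 0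
        (fun s y => PySem.Set.add (PySem.Set.add s (x, y)) (y, x)) s
      simp only [PySem.List.pyGetD_zero_cons]
      rw [this, foldl_add_pairs]
      show PySem.Set.update s ((x,x) :: (x,x) :: r.flatMap (fun z => [(x, z), (z, x)])) = _
      rw [PySem.Set.update_cons, PySem.Set.update_cons, add_add_self, ← PySem.Set.update_cons]
    rw [h0]
    -- the remaining i-loop is the loop over r, indices shifted by one
    rw [pyRange_shift 0 (r.length : Int), List.foldl_map]
    rw [PySem.List.foldl_congr_mem _ _ (fun res i =>
      (PySem.List.pyRange i (r.length : Int)).foldl (fun res j =>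
        PySem.Set.add (PySem.Set.add res (PySem.List.pyGetD r i 0, PySem.List.pyGetD r j 0))
          (PySem.List.pyGetD r j 0, PySem.List.pyGetD r i 0)) res) _ ?_]
    · rw [ih, emitGroup, ← PySem.Set.update_append]
    · intro acc i hi
      rw [PySem.List.mem_pyRange_one] at hi
      rw [pyRange_shift i (r.length : Int), List.foldl_map]
      rw [pyGetD_cons_succ' x r i hi.1 hi.2]
      apply PySem.List.foldl_congr_mem
      intro acc2 j hj
      rw [PySem.List.mem_pyRange_one] at hj
      rw [pyGetD_cons_succ' x r j (by omega) hj.2]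

lemma foldl_update_emit (l : List (List Int)) (s : PySem.Set (Int × Int)) :
    l.foldl (fun s g => PySem.Set.update s (emitGroup g)) s
    = PySem.Set.update s (l.flatMap emitGroup) := by
  induction l generalizing s with
  | nil => simp [PySem.Set.update]
  | cons g t ih => simp [List.flatMap_cons, PySem.Set.update_append, ih]

-- B's seen/out loop produces one emitted block per first-seen value, in order
lemma bLoop_eq (f : List (Int × Int)) (l : List (Int × Int)) (seen : List Int) (out : List (Int × Int)) :
    (l.foldl (fun acc kv =>
      if kv.2 ∈ acc.1 then acc
      else (acc.1 ++ [kv.2], acc.2 ++ emitGroup ((f.filter (fun p => p.2 == kv.2)).map Prod.fst)))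
      (seen, out)).2
    = out ++ ((PySem.Set.ofList (l.map Prod.snd)).filter (fun v => !(seen.contains v))).flatMap
        (fun v => emitGroup (grpOf f v)) := by
  induction l generalizing seen out with
  | nil => simp [PySem.Set.ofList]
  | cons kv t ih =>
    rw [List.map_cons, PySem.Set.ofList_cons]
    by_cases h : kv.2 ∈ seen
    · rw [List.foldl_cons, if_pos h, ih]
      have hc : seen.contains kv.2 = true := by simpa using h
      have hfil : ((PySem.Set.ofList (t.map Prod.snd)).discard kv.2).filter
            (fun v => !(seen.contains v))
          = (PySem.Set.ofList (t.map Prod.snd)).filter (fun v => !(seen.contains v)) := by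
        rw [PySem.Set.discard, List.filter_filter]
        apply List.filter_congr
        intro y _
        by_cases hy : y = kv.2
        · simp [hy, h]
        · simp [hy]
      simp only [List.filter_cons, hc, Bool.not_true]
      rw [if_neg (by simp), hfil]
    · rw [List.foldl_cons, if_neg h, ih]
      have hc : seen.contains kv.2 = false := by simpa using h
      have hfil : ((PySem.Set.ofList (t.map Prod.snd)).discard kv.2).filter
            (fun v => !(seen.contains v))
          = (PySem.Set.ofList (t.map Prod.snd)).filter
            (fun v => !((seen ++ [kv.2]).contains v)) := by
        rw [PySem.Set.discard, List.filter_filter]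
        apply List.filter_congr
        intro y _
        by_cases hy : y = kv.2
        · simp [hy, List.contains_eq_any_beq]
        · simp [hy, List.contains_eq_any_beq]
      simp only [List.filter_cons, hc, Bool.not_false]
      rw [if_pos (by simp), hfil, List.flatMap_cons, ← List.append_assoc]
      rfl

-- ===== VERDICT (by name: the statement is the Claim_ definition above) =====
theorem kernel_spec : Claim_equal_kernel := by
  intro f _ _
  unfold Spec_kernel
  show ((f.foldl (fun d kv =>
      let d1 := if d.contains kv.2 then d else d.insert kv.2 ([] : List Int)
      d1.insert kv.2 (d1.getD kv.2 [] ++ [kv.1])) PySem.Dict.empty).values).foldl _ PySem.Set.empty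
    = kernel_alt f
  rw [PySem.List.foldl_congr_mem f _
    (fun d kv => d.modify kv.2 [] (fun g => g ++ [kv.1])) _
    (fun d kv _ => stepA_eq_modify d kv)]
  rw [values_dictA]
  rw [PySem.List.foldl_congr_mem _ _ (fun s g => PySem.Set.update s (emitGroup g)) _
    (fun s g _ => innerA_eq g s)]
  rw [foldl_update_emit]
  show PySem.Set.update [] _ = _
  rw [PySem.Set.update_nil_left, List.flatMap_map]
  unfold kernel_alt
  rw [bLoop_eq f f [] []]
  simp [grpOf]
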